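-- pv_equiv track=rewrite | github.com/frank217/Summer-Coding-2018 | Dynamic Programming/pi.py | getdif
-- ===== SOURCE A (Python) =====
-- def getdif(num):
--     s = set(num)
--     if len(s)== 1:
--         return 1
--     elif len(s) == 2:
--         return 4
--
--     p = num[0]
--     inc = int(num[1])- int(num[0])
--     for i in num[1:]:
--         if inc != (int(i) - int(p)) :
--             return 10
--         p = i
--     if inc ==1:
--         return 2
--     else:
--         return 5
-- ===== SOURCE B (Python) =====
-- def getdif(num):
--     s = set(num)
--     if len(s) == 1:
--         return 1
--     if len(s) == 2:
--         return 4
--     # Generate-and-compare: build the ideal arithmetic progression fixed by the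
--     # first two digits and compare it wholesale with the actual digit values.
--     vals = [int(c) for c in num]
--     inc = vals[1] - vals[0]
--     if vals == [vals[0] + i * inc for i in range(len(num))]:
--         return 2 if inc == 1 else 5
--     return 10
-- ===== Notes on version B (the rewrite author's own statement) =====
-- stated objective: alternative
-- what changed: Replaces A's running-pointer scan over consecutive differences (with in-loop early return) by a generate-and-compare strategy: B never computes consecutive differences; it builds the ideal arithmetic progression vals[0] + i*inc from the first two digits via a closed-form index formula and compares it wholesale with the digit list.
-- outside the precondition, e.g. on getdif('132a'): A returns 10, B raises ValueError
import Mathlib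
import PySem

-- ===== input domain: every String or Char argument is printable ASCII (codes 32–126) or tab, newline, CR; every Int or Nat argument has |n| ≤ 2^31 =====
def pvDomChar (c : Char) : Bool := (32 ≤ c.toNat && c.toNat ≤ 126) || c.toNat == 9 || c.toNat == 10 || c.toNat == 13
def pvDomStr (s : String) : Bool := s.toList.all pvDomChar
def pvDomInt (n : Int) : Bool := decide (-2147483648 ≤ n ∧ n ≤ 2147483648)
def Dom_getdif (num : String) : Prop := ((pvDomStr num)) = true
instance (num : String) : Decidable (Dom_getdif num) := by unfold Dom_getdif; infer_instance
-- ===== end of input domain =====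

-- B replaces A's running-pointer scan over consecutive differences (early in-loop return 10)
-- by generate-and-compare: it builds the ideal arithmetic progression from the first two
-- digits via a closed-form index formula and compares it wholesale with the digit list.

-- ===== PORT A =====
-- int(c) for a one-character string c; Pre_ restricts to digits, where ofChars? is some
def pyIntChar (c : Char) : Int := (PySem.Int.ofChars? [c]).getD 0

-- the `for i in num[1:]` loop with running pointer p and early return 10
def getdifLoop (inc : Int) (p : Char) : List Char → Int
  | [] => if inc == 1 then 2 else 5
  | i :: rest => if inc ≠ pyIntChar i - pyIntChar p then 10 else getdifLoop inc i rest

def getdif (num : String) : Int :=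
  let s : PySem.Set Char := PySem.Set.ofList num.toList
  if PySem.Set.len s == 1 then 1
  else if PySem.Set.len s == 2 then 4
  else
    let p := (PySem.List.pyGet? num.toList 0).getD ' '      -- num[0]; Pre_ excludes empty num
    let inc := pyIntChar ((PySem.List.pyGet? num.toList 1).getD ' ') - pyIntChar p
    getdifLoop inc p (PySem.List.slice num.toList (some 1) none)   -- num[1:]

-- ===== PORT B =====
def getdif_alt (num : String) : Int :=
  let s : PySem.Set Char := PySem.Set.ofList num.toList
  if PySem.Set.len s == 1 then 1
  else if PySem.Set.len s == 2 then 4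
  else
    let vals := num.toList.map pyIntChar                           -- [int(c) for c in num]
    let v0 := (PySem.List.pyGet? vals 0).getD 0                    -- vals[0]
    let inc := (PySem.List.pyGet? vals 1).getD 0 - v0              -- vals[1] - vals[0]
    -- vals == [vals[0] + i * inc for i in range(len(num))]
    if vals == (PySem.List.pyRange 0 (vals.length : Int) 1).map (fun i => v0 + i * inc)
    then (if inc == 1 then 2 else 5) else 10

-- ===== PRECONDITION & SPEC =====
-- Pre_ excludes the empty string (A raises IndexError at num[1]) and strings with ≥3 distinct
-- characters containing a non-digit: there int() raises ValueError in both programs, except that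
-- A may short-circuit to 10 on a difference mismatch before reaching the non-digit while B's
-- exhaustive int() conversion raises; B does the natural thing (raise) on all of them.
def Pre_getdif (num : String) : Prop :=
  num.toList ≠ [] ∧
    ((PySem.Set.ofList num.toList).length ≤ 2 ∨ num.toList.all (fun c => c.isDigit) = true)
instance (num : String) : Decidable (Pre_getdif num) := by unfold Pre_getdif; infer_instance
def pvWitness_getdif : String := "135"

def Spec_getdif (num : String) (out : Int) : Prop := out = getdif_alt num
instance (num : String) (out : Int) : Decidable (Spec_getdif num out) := by unfold Spec_getdif; infer_instance

-- ===== CLAIM (what is proved, stated in full; the proofs are below) =====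
def Claim_equal_getdif : Prop := ∀ (num : String), Dom_getdif num → Pre_getdif num → Spec_getdif num (getdif num)

-- ===== LEMMAS AND PROOFS =====

-- shifting the base of a closed-form arithmetic progression past its first element
lemma map_range_succ_shift (x inc : Int) (n : ℕ) :
    (List.range (n + 1)).map (fun (k : ℕ) => x + (k : Int) * inc)
      = x :: (List.range n).map (fun (k : ℕ) => (x + inc) + (k : Int) * inc) := by
  rw [List.range_succ_eq_map]
  simp only [List.map_cons, List.map_map]
  refine congrArg₂ List.cons (by push_cast; ring) ?_
  apply List.map_congr_left
  intro k _
  simp only [Function.comp_apply, Nat.succ_eq_add_one]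
  push_cast; ring

-- A's loop, classified by comparison with the closed-form arithmetic progression
lemma getdifLoop_eq_AP : ∀ (l : List Char) (p : Char) (inc : Int),
    getdifLoop inc p l =
      if (p :: l).map pyIntChar =
         (List.range (l.length + 1)).map (fun (k : ℕ) => pyIntChar p + (k : Int) * inc)
      then (if inc == 1 then 2 else 5) else 10 := by
  intro l
  induction l with
  | nil => intro p inc; simp [getdifLoop, List.range_succ]
  | cons i rest ih =>
      intro p inc
      simp only [getdifLoop, List.length_cons]
      by_cases h : inc = pyIntChar i - pyIntChar p
      · have hi : pyIntChar i = pyIntChar p + inc := by omega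
        rw [if_neg (by simp [h]), ih i inc]
        have key : ((i :: rest).map pyIntChar =
              (List.range (rest.length + 1)).map (fun (k : ℕ) => pyIntChar i + (k : Int) * inc))
            ↔ ((p :: i :: rest).map pyIntChar =
              (List.range (rest.length + 1 + 1)).map (fun (k : ℕ) => pyIntChar p + (k : Int) * inc)) := by
          rw [map_range_succ_shift (pyIntChar p) inc (rest.length + 1), ← hi]
          simp
        exact if_congr key rfl rfl
      · rw [if_pos (by simpa using h), if_neg]
        intro hcontra
        rw [map_range_succ_shift, map_range_succ_shift] at hcontra
        simp only [List.map_cons, List.cons.injEq] at hcontra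
        omega

-- ===== VERDICT (by name: the statement is the Claim_ definition above) =====
theorem getdif_spec : Claim_equal_getdif := by
  intro num _ hpre
  unfold Spec_getdif getdif getdif_alt
  obtain ⟨hne, -⟩ := hpre
  by_cases h1 : (PySem.Set.ofList num.toList).length = 1
  · simp [PySem.Set.len, h1]
  · by_cases h2 : (PySem.Set.ofList num.toList).length = 2
    · simp [PySem.Set.len, h2]
    · have h2' : ¬((PySem.Set.ofList num.toList).length : Int) = 2 := by exact_mod_cast h2
      have c1 : ((PySem.Set.ofList num.toList).len == (1 : Int)) = false := by
        simp only [PySem.Set.len, beq_eq_false_iff_ne, ne_eq, Nat.cast_eq_one]; exact h1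
      have c2 : ((PySem.Set.ofList num.toList).len == (2 : Int)) = false := by
        simp only [PySem.Set.len, beq_eq_false_iff_ne, ne_eq]; exact h2'
      simp only [c1, c2, Bool.false_eq_true, if_false]
      match hl : num.toList with
      | [] => exact absurd hl hne
      | [a] =>
          exfalso
          rw [hl] at h1
          simp [PySem.Set.ofList_eq_foldl, PySem.Set.add, PySem.Set.contains] at h1
      | a :: b :: rest =>
          rw [PySem.List.slice_from_one]
          simp only [List.tail_cons]
          have g0 : PySem.List.pyGet? (a :: b :: rest) 0 = some a := by
            simp only [PySem.List.pyGet?, PySem.List.pyIdx?]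
            norm_num
            rw [if_pos (by omega : (0:Int) ≤ (rest.length:Int) + 1)]
            simp
          have g1 : PySem.List.pyGet? (a :: b :: rest) 1 = some b := by
            simp only [PySem.List.pyGet?, PySem.List.pyIdx?]
            norm_num
          have g0' : PySem.List.pyGet? ((a :: b :: rest).map pyIntChar) 0 = some (pyIntChar a) := by
            simp only [List.map_cons, PySem.List.pyGet?, PySem.List.pyIdx?]
            norm_num
            rw [if_pos (by omega : (0:Int) ≤ ((rest.length : Int)) + 1)]
            simp
          have g1' : PySem.List.pyGet? ((a :: b :: rest).map pyIntChar) 1 = some (pyIntChar b) := by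
            simp [PySem.List.pyGet?, PySem.List.pyIdx?]
          rw [g0, g1, g0', g1']
          simp only [Option.getD_some]
          rw [getdifLoop_eq_AP]
          -- rewrite B's pyRange-comprehension into the Nat-range closed form
          have hr : (PySem.List.pyRange 0 (((a :: b :: rest).map pyIntChar).length : Int) 1).map
                (fun i => pyIntChar a + i * (pyIntChar b - pyIntChar a))
              = (List.range ((b :: rest).length + 1)).map
                (fun (k : ℕ) => pyIntChar a + (k : Int) * (pyIntChar b - pyIntChar a)) := by
            rw [PySem.List.pyRange_one]
            have hlen : ((((a :: b :: rest).map pyIntChar).length : Int) - 0).toNat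
                = (b :: rest).length + 1 := by simp; omega
            rw [hlen]
            simp [List.map_map, Function.comp]
          rw [hr]
          simp
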